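-- pv_equiv track=rewrite | github.com/dipta007/huffman-coding-encryption | utility.py | binary_sub
-- ===== SOURCE A (Python) =====
-- def binary_sub(a, b):
--     if len(a) < len(b):
--         a, b = b, a
--
--     b = "0" * (len(a) - len(b)) + b
--
--     carry = 0
--     ret = ""
--     for i in range(len(a) - 1, -1, -1):
--         v = int(a[i]) - int(b[i]) - carry
--         if v < 0:
--             v += 2
--             carry = 1
--         else:
--             carry = 0
--         ret = str(v) + ret
--
--     return ret
-- ===== SOURCE B (Python) =====
-- def binary_sub(a, b):
--     # Like A: when a is shorter, the operands are swapped, so the longer-width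
--     # operand is the minuend; result keeps the longer width, wrapping mod 2**n.
--     if len(a) < len(b):
--         a, b = b, a
--     if not a:
--         return ""
--     n = len(a)
--     diff = (int(a, 2) - int(b or '0', 2)) % (2 ** n)
--     return format(diff, '0{}b'.format(n))
-- ===== Notes on version B (the rewrite author's own statement) =====
-- stated objective: simpler
-- what changed: B replaces A's digit-by-digit borrow-propagating loop with one closed-form computation: convert both operands to integers, take (ia - ib) mod 2**n for n the longer width, and format the result back as an n-wide binary string.
-- outside the precondition, e.g. on binary_sub('7', '3'): A returns '4', B raises ValueError
import Mathlib
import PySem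

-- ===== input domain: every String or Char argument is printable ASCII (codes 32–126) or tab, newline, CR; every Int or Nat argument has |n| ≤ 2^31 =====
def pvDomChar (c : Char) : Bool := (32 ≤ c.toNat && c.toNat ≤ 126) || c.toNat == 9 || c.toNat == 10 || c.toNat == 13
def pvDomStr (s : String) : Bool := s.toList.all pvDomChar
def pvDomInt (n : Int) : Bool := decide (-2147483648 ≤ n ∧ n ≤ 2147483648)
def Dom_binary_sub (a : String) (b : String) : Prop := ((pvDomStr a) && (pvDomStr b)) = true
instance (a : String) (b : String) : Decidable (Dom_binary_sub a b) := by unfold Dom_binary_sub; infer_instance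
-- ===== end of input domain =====

-- B replaces A's borrow-propagating digit loop by one modular-arithmetic computation
-- ((ia - ib) mod 2^n, re-formatted to width n); objective: simpler.
-- Pre_ restricts to strings of '0'/'1' characters: on other digit strings A still
-- returns a (decimal-subtraction) value but B's int(s, 2) raises ValueError.


-- ===== PORT A =====
-- int(a[i]) on a one-character string (exact: PySem.Int.ofChars?; default unreachable under Pre_)
def pvDigitA (c : Char) : Int := (PySem.Int.ofChars? [c]).getD 0

def binary_sub (a : String) (b : String) : String :=
  -- if len(a) < len(b): a, b = b, a
  let p := if a.toList.length < b.toList.length then (b, a) else (a, b)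
  let al := p.1.toList
  -- b = "0" * (len(a) - len(b)) + b   (the repeat count is len(a) - len(b) ≥ 0 here)
  let bl := List.replicate (al.length - p.2.toList.length) '0' ++ p.2.toList
  -- carry = 0; ret = ""; for i in range(len(a) - 1, -1, -1): … ret = str(v) + ret
  let st := (PySem.List.pyRange ((al.length : Int) - 1) (-1) (-1)).foldl
    (fun (st : Int × List Char) i =>
      let v := pvDigitA (PySem.List.pyGetD al i ' ') - pvDigitA (PySem.List.pyGetD bl i ' ') - st.1
      if v < 0 then (1, PySem.Int.toChars (v + 2) ++ st.2)
      else (0, PySem.Int.toChars v ++ st.2))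
    ((0 : Int), ([] : List Char))
  String.mk st.2

-- ===== PORT B =====
-- int(s, 2): hand port, exact on the nonempty '0'/'1' strings B feeds it under Pre_
def pvInt2 (cs : List Char) : Int :=
  cs.foldl (fun acc c => 2 * acc + (if c = '1' then 1 else 0)) 0

-- binary digits of v, most significant first (format(v, 'b') for v > 0)
def pvToBin (n : Nat) : List Char :=
  if h : n = 0 then []
  else pvToBin (n / 2) ++ [if n % 2 = 1 then '1' else '0']
  decreasing_by exact Nat.div_lt_self (Nat.pos_of_ne_zero h) one_lt_two

-- format(v, '0{n}b'): binary digits of v, left-padded with '0' to width n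
def pvFormatBin (v : Nat) (n : Nat) : List Char :=
  let s := if v = 0 then ['0'] else pvToBin v
  List.replicate (n - s.length) '0' ++ s

def binary_sub_alt (a : String) (b : String) : String :=
  -- if len(a) < len(b): a, b = b, a
  let p := if a.toList.length < b.toList.length then (b, a) else (a, b)
  if p.1.toList = [] then "" else
  let n := p.1.toList.length
  let ia := pvInt2 p.1.toList
  let ib := pvInt2 (if p.2.toList = [] then ['0'] else p.2.toList)  -- int(b or '0', 2)
  let diff := PySem.Int.mod (ia - ib) (2 ^ n)
  String.mk (pvFormatBin diff.toNat n)

-- ===== PRECONDITION & SPEC =====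
-- Pre_: both strings consist of '0'/'1' characters only.  On other strings A either
-- raises ValueError (non-digit characters) or — on decimal digits 2-9 — returns a
-- digitwise value that B's int(s, 2) refuses with ValueError, so B raises there.
def Pre_binary_sub (a : String) (b : String) : Prop :=
  (a.toList.all (fun c => c == '0' || c == '1')) = true ∧
  (b.toList.all (fun c => c == '0' || c == '1')) = true
instance (a : String) (b : String) : Decidable (Pre_binary_sub a b) := by
  unfold Pre_binary_sub; infer_instance

def pvWitness_binary_sub : String × String := ("101", "11")

def Spec_binary_sub (a : String) (b : String) (out : String) : Prop := out = binary_sub_alt a b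
instance (a : String) (b : String) (out : String) : Decidable (Spec_binary_sub a b out) := by
  unfold Spec_binary_sub; infer_instance

-- ===== CLAIM (what is proved, stated in full; the proofs are below) =====
def Claim_equal_binary_sub : Prop := ∀ (a : String) (b : String), Dom_binary_sub a b → Pre_binary_sub a b → Spec_binary_sub a b (binary_sub a b)

-- ===== LEMMAS AND PROOFS =====

-- "binary list": every character is '0' or '1'
def pvBin (s : List Char) : Prop := ∀ c ∈ s, c = '0' ∨ c = '1'

def pvBit (c : Char) : Int := if c = '1' then 1 else 0

-- value of a least-significant-digit-first list
def pvRval : List Char → Int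
  | [] => 0
  | c :: s => pvBit c + 2 * pvRval s

-- A's loop, recast as structural recursion on the reversed (lsb-first) operands
def pvRsub : List Char → List Char → Int → Int × List Char
  | p :: ps, q :: qs, c =>
    let v := pvDigitA p - pvDigitA q - c
    let s := if v < 0 then ((1 : Int), v + 2) else ((0 : Int), v)
    let r := pvRsub ps qs s.1
    (r.1, r.2 ++ PySem.Int.toChars s.2)
  | _, _, c => (c, [])

lemma pvInt2_snoc (s : List Char) (c : Char) :
    pvInt2 (s ++ [c]) = 2 * pvInt2 s + pvBit c := by
  simp [pvInt2, pvBit, List.foldl_append]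

lemma pvInt2_gen (s : List Char) : ∀ a : Int,
    s.foldl (fun acc c => 2 * acc + (if c = '1' then 1 else 0)) a
      = a * 2 ^ s.length + pvInt2 s := by
  induction s with
  | nil => intro a; simp [pvInt2]
  | cons c s ih =>
    intro a
    have h1 : pvInt2 (c :: s) =
        s.foldl (fun acc c => 2 * acc + (if c = '1' then 1 else 0))
          (2 * 0 + (if c = '1' then 1 else 0)) := rfl
    rw [List.foldl_cons, ih, h1, ih, List.length_cons]
    ring

lemma pvInt2_cons (c : Char) (s : List Char) :
    pvInt2 (c :: s) = pvBit c * 2 ^ s.length + pvInt2 s := by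
  have h1 : pvInt2 (c :: s) =
      s.foldl (fun acc c => 2 * acc + (if c = '1' then 1 else 0))
        (2 * 0 + (if c = '1' then 1 else 0)) := rfl
  rw [h1, pvInt2_gen]
  simp [pvBit]

lemma pvInt2_bounds (s : List Char) (h : pvBin s) :
    0 ≤ pvInt2 s ∧ pvInt2 s < 2 ^ s.length := by
  induction s with
  | nil => simp [pvInt2]
  | cons c s ih =>
    have hs := ih (fun x hx => h x (List.mem_cons_of_mem _ hx))
    have hc := h c List.mem_cons_self
    have hb : pvBit c = 0 ∨ pvBit c = 1 := by
      rcases hc with hc | hc <;> simp [pvBit, hc]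
    have hcons := pvInt2_cons c s
    rcases hb with hb | hb <;>
      rw [List.length_cons, pow_succ, hcons, hb] <;>
      constructor <;> nlinarith [hs.1, hs.2]

lemma pvInt2_unique : ∀ (s t : List Char), pvBin s → pvBin t →
    s.length = t.length → pvInt2 s = pvInt2 t → s = t := by
  intro s
  induction s with
  | nil => intro t _ _ hl _; exact (List.eq_nil_of_length_eq_zero hl.symm).symm
  | cons c s ih =>
    intro t hbs hbt hl hv
    cases t with
    | nil => simp at hl
    | cons d t =>
      have hls : s.length = t.length := by simpa using hl
      have hbss : pvBin s := fun x hx => hbs x (List.mem_cons_of_mem _ hx)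
      have hbtt : pvBin t := fun x hx => hbt x (List.mem_cons_of_mem _ hx)
      have hs := pvInt2_bounds s hbss
      have ht := pvInt2_bounds t hbtt
      have hcc := hbs c List.mem_cons_self
      have hdd := hbt d List.mem_cons_self
      have hb1 : pvBit c = 0 ∨ pvBit c = 1 := by
        rcases hcc with h | h <;> simp [pvBit, h]
      have hb2 : pvBit d = 0 ∨ pvBit d = 1 := by
        rcases hdd with h | h <;> simp [pvBit, h]
      rw [pvInt2_cons, pvInt2_cons, hls] at hv
      rw [hls] at hs
      have hbit : pvBit c = pvBit d := by
        rcases hb1 with h1 | h1 <;> rcases hb2 with h2 | h2 <;>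
          rw [h1, h2] at hv ⊢ <;> linarith [hs.1, hs.2, ht.1, ht.2]
      have hveq : pvInt2 s = pvInt2 t := by rw [hbit] at hv; linarith
      have hcd : c = d := by
        rcases hcc with h1 | h1 <;> rcases hdd with h2 | h2 <;>
          subst h1 <;> subst h2 <;> simp [pvBit] at hbit ⊢
      rw [hcd, ih t hbss hbtt hls hveq]

lemma pvRval_eq (s : List Char) : pvRval s = pvInt2 s.reverse := by
  induction s with
  | nil => simp [pvRval, pvInt2]
  | cons c s ih => simp [pvRval, ih, pvInt2_snoc]; ring

lemma pvDigitA_eq (c : Char) (h : c = '0' ∨ c = '1') : pvDigitA c = pvBit c := by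
  rcases h with h | h <;> subst h <;> decide

lemma pvToChars_0 : PySem.Int.toChars 0 = ['0'] := by decide
lemma pvToChars_1 : PySem.Int.toChars 1 = ['1'] := by decide

lemma pvRsub_spec : ∀ (ps qs : List Char) (c : Int), ps.length = qs.length →
    pvBin ps → pvBin qs → (c = 0 ∨ c = 1) →
    ((pvRsub ps qs c).1 = 0 ∨ (pvRsub ps qs c).1 = 1) ∧
    pvBin (pvRsub ps qs c).2 ∧
    (pvRsub ps qs c).2.length = ps.length ∧
    pvInt2 (pvRsub ps qs c).2 = pvRval ps - pvRval qs - c + (pvRsub ps qs c).1 * 2 ^ ps.length := by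
  intro ps
  induction ps with
  | nil =>
    intro qs c hl _ _ hc
    have : qs = [] := List.eq_nil_of_length_eq_zero hl.symm
    subst this
    exact ⟨hc, by simp [pvRsub, pvBin], by simp [pvRsub], by simp [pvRsub, pvRval, pvInt2]⟩
  | cons p ps ih =>
    intro qs c hl hbp hbq hc
    cases qs with
    | nil => simp at hl
    | cons q qs =>
      have hl' : ps.length = qs.length := by simpa using hl
      have hbps : pvBin ps := fun x hx => hbp x (List.mem_cons_of_mem _ hx)
      have hbqs : pvBin qs := fun x hx => hbq x (List.mem_cons_of_mem _ hx)
      have hp : pvDigitA p = pvBit p := pvDigitA_eq p (hbp p List.mem_cons_self)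
      have hq : pvDigitA q = pvBit q := pvDigitA_eq q (hbq q List.mem_cons_self)
      have hp2 : pvBit p = 0 ∨ pvBit p = 1 := by
        rcases hbp p List.mem_cons_self with h | h <;> simp [pvBit, h]
      have hq2 : pvBit q = 0 ∨ pvBit q = 1 := by
        rcases hbq q List.mem_cons_self with h | h <;> simp [pvBit, h]
      simp only [pvRsub, hp, hq, List.length_cons]
      split_ifs with hv
      · obtain ⟨h1, h2, h3, h4⟩ := ih qs 1 hl' hbps hbqs (Or.inr rfl)
        have hd : pvBit p - pvBit q - c + 2 = 0 ∨ pvBit p - pvBit q - c + 2 = 1 := by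
          rcases hp2 with e1 | e1 <;> rcases hq2 with e2 | e2 <;> omega
        rcases hd with hd | hd <;> rw [hd] <;>
          [rw [pvToChars_0]; rw [pvToChars_1]] <;>
          refine ⟨h1, ?_, ?_, ?_⟩
        · intro x hx
          rcases List.mem_append.1 hx with h | h
          · exact h2 x h
          · simp at h; simp [h]
        · simp [h3]
        · rw [pvInt2_snoc, h4]
          simp only [pvRval, pow_succ]
          generalize (2:ℤ) ^ ps.length = P at *
          simp [pvBit] at hd ⊢
          linarith
        · intro x hx
          rcases List.mem_append.1 hx with h | h
          · exact h2 x h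
          · simp at h; simp [h]
        · simp [h3]
        · rw [pvInt2_snoc, h4]
          simp only [pvRval, pow_succ]
          generalize (2:ℤ) ^ ps.length = P at *
          simp [pvBit] at hd ⊢
          linarith
      · obtain ⟨h1, h2, h3, h4⟩ := ih qs 0 hl' hbps hbqs (Or.inl rfl)
        have hd : pvBit p - pvBit q - c = 0 ∨ pvBit p - pvBit q - c = 1 := by
          rcases hp2 with e1 | e1 <;> rcases hq2 with e2 | e2 <;> omega
        rcases hd with hd | hd <;> rw [hd] <;>
          [rw [pvToChars_0]; rw [pvToChars_1]] <;>
          refine ⟨h1, ?_, ?_, ?_⟩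
        · intro x hx
          rcases List.mem_append.1 hx with h | h
          · exact h2 x h
          · simp at h; simp [h]
        · simp [h3]
        · rw [pvInt2_snoc, h4]
          simp only [pvRval, pow_succ]
          generalize (2:ℤ) ^ ps.length = P at *
          simp [pvBit] at hd ⊢
          linarith
        · intro x hx
          rcases List.mem_append.1 hx with h | h
          · exact h2 x h
          · simp at h; simp [h]
        · simp [h3]
        · rw [pvInt2_snoc, h4]
          simp only [pvRval, pow_succ]
          generalize (2:ℤ) ^ ps.length = P at *
          simp [pvBit] at hd ⊢
          linarith

def pvStep (x y : List Char) (st : Int × List Char) (i : Int) : Int × List Char :=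
  let v := pvDigitA (PySem.List.pyGetD x i ' ') - pvDigitA (PySem.List.pyGetD y i ' ') - st.1
  if v < 0 then (1, PySem.Int.toChars (v + 2) ++ st.2)
  else (0, PySem.Int.toChars v ++ st.2)

lemma pvBridge : ∀ (m : Nat) (x y : List Char) (c : Int) (r : List Char),
    x.length = m → y.length = m →
    (PySem.List.pyRange ((m : Int) - 1) (-1) (-1)).foldl (pvStep x y) (c, r)
    = ((pvRsub x.reverse y.reverse c).1, (pvRsub x.reverse y.reverse c).2 ++ r) := by
  intro m
  induction m with
  | zero =>
    intro x y c r hx hy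
    have hx0 : x = [] := List.eq_nil_of_length_eq_zero hx
    have hy0 : y = [] := List.eq_nil_of_length_eq_zero hy
    subst hx0; subst hy0
    rw [PySem.List.pyRange_neg_one_eq_nil (by norm_num)]
    simp [pvRsub]
  | succ m ih =>
    intro x y c r hx hy
    have hxne : x ≠ [] := by intro h; rw [h] at hx; simp at hx
    have hyne : y ≠ [] := by intro h; rw [h] at hy; simp at hy
    obtain ⟨x', cx, rfl⟩ : ∃ x' cx, x = x' ++ [cx] :=
      ⟨x.dropLast, x.getLast hxne, (List.dropLast_concat_getLast hxne).symm⟩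
    obtain ⟨y', cy, rfl⟩ : ∃ y' cy, y = y' ++ [cy] :=
      ⟨y.dropLast, y.getLast hyne, (List.dropLast_concat_getLast hyne).symm⟩
    have hx' : x'.length = m := by simp at hx; omega
    have hy' : y'.length = m := by simp at hy; omega
    have e1 : ((m + 1 : Nat) : Int) - 1 = (m : Int) := by push_cast; ring
    rw [e1, PySem.List.pyRange_neg_one_cons (by omega : (-1 : Int) < (m : Int))]
    rw [List.foldl_cons]
    have hget1 : PySem.List.pyGetD (x' ++ [cx]) ((m : Int)) ' ' = cx := by
      rw [PySem.List.pyGetD_natCast]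
      simp [List.getD, List.getElem?_append_right, hx']
    have hget2 : PySem.List.pyGetD (y' ++ [cy]) ((m : Int)) ' ' = cy := by
      rw [PySem.List.pyGetD_natCast]
      simp [List.getD, List.getElem?_append_right, hy']
    have hget : ∀ (z' : List Char) (cz : Char), z'.length = m →
        ∀ i ∈ PySem.List.pyRange ((m : Int) - 1) (-1) (-1),
        PySem.List.pyGetD (z' ++ [cz]) i ' ' = PySem.List.pyGetD z' i ' ' := by
      intro z' cz hz i hi
      rw [PySem.List.mem_pyRange_neg_one] at hi
      lift i to ℕ using (by omega : (0 : ℤ) ≤ i) with k hk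
      have hklt : k < z'.length := by omega
      rw [PySem.List.pyGetD_natCast, PySem.List.pyGetD_natCast]
      simp [List.getD, List.getElem?_append_left hklt]
    have hstep1 : pvStep (x' ++ [cx]) (y' ++ [cy]) (c, r) ((m : Int))
        = if pvDigitA cx - pvDigitA cy - c < 0
          then (1, PySem.Int.toChars (pvDigitA cx - pvDigitA cy - c + 2) ++ r)
          else (0, PySem.Int.toChars (pvDigitA cx - pvDigitA cy - c) ++ r) := by
      simp only [pvStep, hget1, hget2]
    have hfun : ∀ (acc : Int × List Char) (i : Int),
        i ∈ PySem.List.pyRange ((m : Int) - 1) (-1) (-1) →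
        pvStep (x' ++ [cx]) (y' ++ [cy]) acc i = pvStep x' y' acc i := by
      intro acc i hi
      simp only [pvStep, hget x' cx hx' i hi, hget y' cy hy' i hi]
    rw [PySem.List.foldl_congr_mem _ _ _ _ hfun, hstep1]
    have hrev1 : (x' ++ [cx]).reverse = cx :: x'.reverse := by simp
    have hrev2 : (y' ++ [cy]).reverse = cy :: y'.reverse := by simp
    rw [hrev1, hrev2]
    simp only [pvRsub]
    split_ifs with hv
    · rw [ih x' y' 1 (PySem.Int.toChars (pvDigitA cx - pvDigitA cy - c + 2) ++ r) hx' hy']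
      simp [List.append_assoc]
    · rw [ih x' y' 0 (PySem.Int.toChars (pvDigitA cx - pvDigitA cy - c) ++ r) hx' hy']
      simp [List.append_assoc]

lemma pvInt2_replicate_append (k : Nat) (s : List Char) :
    pvInt2 (List.replicate k '0' ++ s) = pvInt2 s := by
  induction k with
  | zero => simp
  | succ k ih =>
    rw [List.replicate_succ, List.cons_append, pvInt2_cons, ih]
    simp [pvBit]

lemma pvInt2_toBin (v : Nat) : pvInt2 (pvToBin v) = (v : Int) := by
  induction v using Nat.strong_induction_on with
  | _ v ih =>
    rw [pvToBin]
    split_ifs with h h2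
    · simp [h, pvInt2]
    · rw [pvInt2_snoc, ih (v / 2) (Nat.div_lt_self (Nat.pos_of_ne_zero h) one_lt_two)]
      simp [pvBit]
      omega
    · rw [pvInt2_snoc, ih (v / 2) (Nat.div_lt_self (Nat.pos_of_ne_zero h) one_lt_two)]
      simp [pvBit]
      omega

lemma pvBin_toBin (v : Nat) : pvBin (pvToBin v) := by
  induction v using Nat.strong_induction_on with
  | _ v ih =>
    rw [pvToBin]
    split_ifs with h h2
    · simp [pvBin]
    all_goals
      intro x hx
      rcases List.mem_append.1 hx with hx' | hx'
      · exact ih (v / 2) (Nat.div_lt_self (Nat.pos_of_ne_zero h) one_lt_two) x hx'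
      · simp at hx'; simp [hx']

lemma pvToBin_length_le (v n : Nat) (hv : v < 2 ^ n) : (pvToBin v).length ≤ n := by
  induction n generalizing v with
  | zero =>
    have : v = 0 := by simpa using hv
    rw [this, pvToBin]; simp
  | succ n ih =>
    rw [pvToBin]
    split_ifs with h h2
    · simp
    all_goals
      have hlt : v / 2 < 2 ^ n := by rw [pow_succ] at hv; omega
      simpa using ih (v / 2) hlt

lemma pvFormatBin_spec (v n : Nat) (hn : 1 ≤ n) (hv : v < 2 ^ n) :
    pvBin (pvFormatBin v n) ∧ (pvFormatBin v n).length = n ∧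
    pvInt2 (pvFormatBin v n) = (v : Int) := by
  unfold pvFormatBin
  split_ifs with h
  · subst h
    refine ⟨?_, ?_, ?_⟩
    · intro x hx
      rcases List.mem_append.1 hx with hx' | hx'
      · exact Or.inl (List.eq_of_mem_replicate hx')
      · simp at hx'; simp [hx']
    · simp; omega
    · rw [pvInt2_replicate_append]; simp [pvInt2, pvBit]
  · have hlen : (pvToBin v).length ≤ n := pvToBin_length_le v n hv
    refine ⟨?_, ?_, ?_⟩
    · intro x hx
      rcases List.mem_append.1 hx with hx' | hx'
      · exact Or.inl (List.eq_of_mem_replicate hx')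
      · exact pvBin_toBin v x hx'
    · simp; omega
    · rw [pvInt2_replicate_append, pvInt2_toBin]

lemma pvCore (aS bS : String) (ha : pvBin aS.toList) (hb : pvBin bS.toList)
    (hle : bS.toList.length ≤ aS.toList.length) :
    (let al := aS.toList
     let bl := List.replicate (al.length - bS.toList.length) '0' ++ bS.toList
     let st := (PySem.List.pyRange ((al.length : Int) - 1) (-1) (-1)).foldl (pvStep al bl)
       ((0 : Int), ([] : List Char))
     String.mk st.2)
    = (if aS.toList = [] then "" else
       let n := aS.toList.length
       let ia := pvInt2 aS.toList
       let ib := pvInt2 (if bS.toList = [] then ['0'] else bS.toList)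
       let diff := PySem.Int.mod (ia - ib) (2 ^ n)
       String.mk (pvFormatBin diff.toNat n)) := by
  by_cases hA : aS.toList = []
  · have h0 : aS.toList.length = 0 := by rw [hA]; rfl
    have hB : bS.toList = [] := List.eq_nil_of_length_eq_zero (by omega)
    simp only [hA, hB, if_pos]
    rw [show ((([] : List Char).length : Int) - 1) = (-1 : Int) by simp]
    rw [PySem.List.pyRange_neg_one_eq_nil le_rfl]
    simp only [List.foldl_nil]
    decide
  · simp only [if_neg hA]
    have hnpos : 1 ≤ aS.toList.length := List.length_pos_of_ne_nil hA
    have hbllen : (List.replicate (aS.toList.length - bS.toList.length) '0' ++ bS.toList).length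
        = aS.toList.length := by
      rw [List.length_append, List.length_replicate]; omega
    rw [pvBridge aS.toList.length aS.toList
        (List.replicate (aS.toList.length - bS.toList.length) '0' ++ bS.toList) 0 [] rfl hbllen]
    have hbbl : pvBin (List.replicate (aS.toList.length - bS.toList.length) '0' ++ bS.toList) := by
      intro x hx
      rcases List.mem_append.1 hx with hx' | hx'
      · exact Or.inl (List.eq_of_mem_replicate hx')
      · exact hb x hx'
    have hbxr : pvBin aS.toList.reverse := fun x hx => ha x (List.mem_reverse.1 hx)
    have hbyr : pvBin (List.replicate (aS.toList.length - bS.toList.length) '0' ++ bS.toList).reverse :=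
      fun x hx => hbbl x (List.mem_reverse.1 hx)
    obtain ⟨hc1, hb1, hl1, hv1⟩ := pvRsub_spec aS.toList.reverse
      (List.replicate (aS.toList.length - bS.toList.length) '0' ++ bS.toList).reverse 0
      (by rw [List.length_reverse, List.length_reverse, hbllen]) hbxr hbyr (Or.inl rfl)
    obtain ⟨hr0, hr1⟩ := pvInt2_bounds _ hb1
    rw [List.length_reverse] at hl1
    rw [hl1] at hr1
    rw [List.length_reverse] at hv1
    rw [pvRval_eq, pvRval_eq, List.reverse_reverse, List.reverse_reverse] at hv1
    rw [pvInt2_replicate_append] at hv1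
    have hib : pvInt2 (if bS.toList = [] then ['0'] else bS.toList) = pvInt2 bS.toList := by
      split_ifs with h
      · rw [h]; simp [pvInt2]
      · rfl
    rw [hib]
    have hpow : (0 : Int) < 2 ^ aS.toList.length := by positivity
    have hdiff : PySem.Int.mod (pvInt2 aS.toList - pvInt2 bS.toList) (2 ^ aS.toList.length)
        = pvInt2 (pvRsub aS.toList.reverse
            (List.replicate (aS.toList.length - bS.toList.length) '0' ++ bS.toList).reverse 0).2 := by
      rw [PySem.Int.mod_eq_emod_of_pos hpow]
      have heq : pvInt2 aS.toList - pvInt2 bS.toList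
          = pvInt2 (pvRsub aS.toList.reverse
              (List.replicate (aS.toList.length - bS.toList.length) '0' ++ bS.toList).reverse 0).2
            + 2 ^ aS.toList.length *
              (-(pvRsub aS.toList.reverse
                  (List.replicate (aS.toList.length - bS.toList.length) '0' ++ bS.toList).reverse 0).1) := by
        rw [hv1]; ring
      rw [heq, Int.add_mul_emod_self_left, Int.emod_eq_of_lt hr0 hr1]
    rw [hdiff]
    have hRnat : ((pvInt2 (pvRsub aS.toList.reverse
        (List.replicate (aS.toList.length - bS.toList.length) '0' ++ bS.toList).reverse 0).2).toNat : Int)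
        = pvInt2 (pvRsub aS.toList.reverse
            (List.replicate (aS.toList.length - bS.toList.length) '0' ++ bS.toList).reverse 0).2 :=
      Int.toNat_of_nonneg hr0
    have hcast : (((2 : Nat) ^ aS.toList.length : Nat) : Int) = 2 ^ aS.toList.length := by
      push_cast; ring
    have hvnat : (pvInt2 (pvRsub aS.toList.reverse
        (List.replicate (aS.toList.length - bS.toList.length) '0' ++ bS.toList).reverse 0).2).toNat
        < 2 ^ aS.toList.length := by omega
    obtain ⟨hf1, hf2, hf3⟩ := pvFormatBin_spec _ _ hnpos hvnat
    rw [hRnat] at hf3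
    have hend : (pvRsub aS.toList.reverse
        (List.replicate (aS.toList.length - bS.toList.length) '0' ++ bS.toList).reverse 0).2
        = pvFormatBin (pvInt2 (pvRsub aS.toList.reverse
            (List.replicate (aS.toList.length - bS.toList.length) '0' ++ bS.toList).reverse 0).2).toNat
            aS.toList.length := by
      refine pvInt2_unique _ _ hb1 hf1 ?_ ?_
      · rw [hl1, hf2]
      · rw [hf3]
    rw [List.append_nil]
    exact congrArg String.mk hend

-- ===== VERDICT (by name: the statement is the Claim_ definition above) =====
theorem binary_sub_spec : Claim_equal_binary_sub := by
  intro a b _ hpre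
  unfold Spec_binary_sub binary_sub binary_sub_alt
  have ha : pvBin a.toList := fun c hc => by
    have := List.all_eq_true.1 hpre.1 c hc; simpa using this
  have hb : pvBin b.toList := fun c hc => by
    have := List.all_eq_true.1 hpre.2 c hc; simpa using this
  by_cases hsw : a.toList.length < b.toList.length <;> simp only [hsw, if_true, if_false]
  · exact pvCore b a hb ha (le_of_lt hsw)
  · exact pvCore a b ha hb (le_of_not_gt hsw)
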